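-- pv_equiv track=rewrite | github.com/pypi-data/pypi-mirror-18 | packages/bookmd/bookmd-0.1.0-py2.py3-none-any.whl/bookmd/utils.py | expend_str
-- ===== SOURCE A (Python) =====
-- def expend_str(text, start):
--     n = len(text)
--
--     i = start + 1
--     escape = False
--
--     while i < n:
--         c = text[i]
--         if not escape:
--             # stop.
--             if c == '"':
--                 break
--             # to escape mode.
--             if c == '\\':
--                 escape = True
--         else:
--             # to non-escape mode.
--             escape = False
--         # move to next character.
--         i += 1
--
--     if i >= n:
--         raise RuntimeError("expend_str")
--
--     return i + 1
-- ===== SOURCE B (Python) =====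
-- def expend_str(text, start):
--     lo = start + 1
--     for j in range(lo, len(text)):
--         if text[j] != '"':
--             continue
--         run = 0
--         while j - 1 - run >= lo and text[j - 1 - run] == '\\':
--             run += 1
--         if run % 2 == 0:
--             return j + 1
--     raise RuntimeError("expend_str")
-- ===== Notes on version B (the rewrite author's own statement) =====
-- stated objective: alternative
-- what changed: B drops A's forward escape-state machine: it scans for quote characters and, at each quote, counts the run of backslashes immediately before it backwards, accepting the quote iff that run has even length.
import Mathlib
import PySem

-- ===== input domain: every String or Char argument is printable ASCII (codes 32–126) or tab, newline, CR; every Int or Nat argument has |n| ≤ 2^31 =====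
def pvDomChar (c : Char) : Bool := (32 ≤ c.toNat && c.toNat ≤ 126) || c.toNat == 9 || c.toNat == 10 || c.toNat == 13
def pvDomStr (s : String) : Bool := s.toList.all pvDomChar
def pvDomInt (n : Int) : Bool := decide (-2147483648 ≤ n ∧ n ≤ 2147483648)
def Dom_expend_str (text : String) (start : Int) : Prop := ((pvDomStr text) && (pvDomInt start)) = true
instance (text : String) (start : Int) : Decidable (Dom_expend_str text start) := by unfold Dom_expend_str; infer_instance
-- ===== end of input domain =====

-- B replaces A's forward escape-state loop by a scan for quotes with a backward
-- backslash-run parity check at each quote (objective: alternative, same cost).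

-- ===== PORT A =====
-- A's while loop: i runs from start+1 while i < n carrying the escape flag;
-- the 'raise RuntimeError' branch (i ≥ n) is excluded by Pre_ and ported as junk value 0.
def expendLoopA (cs : List Char) (n i : Int) (escape : Bool) : Int :=
  if _h : i < n then
    match PySem.List.pyGet? cs i with
    | none => 0   -- Python IndexError (i < -len); excluded by Pre_
    | some c =>
      if escape = false then
        if c = '"' then i + 1          -- break, then 'return i + 1'
        else expendLoopA cs n (i + 1) (decide (c = '\\'))
      else expendLoopA cs n (i + 1) false
  else 0          -- Python raises RuntimeError here; excluded by Pre_
termination_by (n - i).toNat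
decreasing_by all_goals exact (Int.toNat_lt_toNat (Int.sub_pos.mpr _h)).mpr (sub_lt_sub_left (lt_add_one i) n)

def expend_str (text : String) (start : Int) : Int :=
  expendLoopA text.toList (text.toList.length : Int) (start + 1) false

-- ===== PORT B =====
-- Source B inner while loop: count backslashes backwards from j-1 down to lo.
def runCountB (cs : List Char) (lo j run : Int) : Int :=
  if _h : lo ≤ j - 1 - run ∧ PySem.List.pyGetD cs (j - 1 - run) ' ' = '\\' then
    runCountB cs lo j (run + 1)
  else run
termination_by (j - 1 - run - lo + 1).toNat
decreasing_by exact (Int.toNat_lt_toNat (by omega)).mpr (by omega)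

-- Source B 'for j in range(lo, len(text))' with early return; [] = the raise, ported as junk 0.
def expendLoopB (cs : List Char) (lo : Int) : List Int → Int
  | [] => 0       -- Python raises RuntimeError here; excluded by Pre_
  | j :: rest =>
    if PySem.List.pyGet? cs j ≠ some '"' then expendLoopB cs lo rest
    else if runCountB cs lo j 0 % 2 = 0 then j + 1
    else expendLoopB cs lo rest

def expend_str_alt (text : String) (start : Int) : Int :=
  expendLoopB text.toList (start + 1) (PySem.List.pyRange (start + 1) (text.toList.length : Int) 1)

-- ===== PRECONDITION & SPEC =====
-- Pre_ excludes exactly the inputs where Python A raises: start+1 < -len(text) (IndexError on the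
-- first index), and inputs whose scan finds no unescaped closing quote (RuntimeError "expend_str").
def Pre_expend_str (text : String) (start : Int) : Prop :=
  (decide (-(text.toList.length : Int) ≤ start + 1) &&
   (let seq := (PySem.List.pyRange (start + 1) (text.toList.length : Int) 1).map
       (fun j => PySem.List.pyGetD text.toList j ' ')
    (List.range seq.length).any (fun k =>
      seq.getD k ' ' == '"' &&
      ((seq.take k).reverse.takeWhile (fun c => c == '\\')).length % 2 == 0))) = true
instance (text : String) (start : Int) : Decidable (Pre_expend_str text start) := by
  unfold Pre_expend_str; infer_instance

def pvWitness_expend_str : String × Int := ("\"ab\\\"c\"", 0)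

def Spec_expend_str (text : String) (start : Int) (out : Int) : Prop := out = expend_str_alt text start
instance (text : String) (start : Int) (out : Int) : Decidable (Spec_expend_str text start out) := by unfold Spec_expend_str; infer_instance

-- ===== CLAIM (what is proved, stated in full; the proofs are below) =====
def Claim_equal_expend_str : Prop := ∀ (text : String) (start : Int), Dom_expend_str text start → Pre_expend_str text start → Spec_expend_str text start (expend_str text start)

-- ===== LEMMAS AND PROOFS =====

-- length of the maximal run of backslashes in cs just before position j, not reaching below lo
def tailRunP (cs : List Char) (lo j : Int) : Nat :=
  if _h : lo < j ∧ PySem.List.pyGetD cs (j - 1) ' ' = '\\' then tailRunP cs lo (j - 1) + 1 else 0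
termination_by (j - lo).toNat
decreasing_by exact (Int.toNat_lt_toNat (Int.sub_pos.mpr _h.1)).mpr (sub_lt_sub_right (sub_one_lt j) lo)


-- B's backward counting loop computes run + tailRunP at the shifted position.
lemma runCountB_eq_tailRunP (cs : List Char) (lo j : Int) :
    ∀ run : Int, runCountB cs lo j run = run + (tailRunP cs lo (j - run) : Int) := by
  intro run
  fun_induction runCountB cs lo j run with
  | case1 run h ih =>
    rw [ih]
    have ht : tailRunP cs lo (j - run) = tailRunP cs lo (j - (run + 1)) + 1 := by
      conv_lhs => rw [tailRunP]
      rw [dif_pos ⟨by omega, by rw [show j - run - 1 = j - 1 - run from by ring]; exact h.2⟩]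
      rw [show j - run - 1 = j - (run + 1) from by ring]
    rw [ht]
    push_cast
    ring
  | case2 run h =>
    have ht : tailRunP cs lo (j - run) = 0 := by
      rw [tailRunP, dif_neg]
      rintro ⟨h1, h2⟩
      exact h ⟨by omega, by rw [show j - 1 - run = j - run - 1 from by ring]; exact h2⟩
    rw [ht]
    simp

lemma tailRunP_step (cs : List Char) (lo i : Int) (h : lo ≤ i) :
    tailRunP cs lo (i + 1) =
      if PySem.List.pyGetD cs i ' ' = '\\' then tailRunP cs lo i + 1 else 0 := by
  rw [tailRunP, show i + 1 - 1 = i from by ring]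
  by_cases hb : PySem.List.pyGetD cs i ' ' = '\\'
  · rw [dif_pos ⟨by omega, hb⟩, if_pos hb]
  · rw [dif_neg (fun hc => hb hc.2), if_neg hb]

lemma tailRunP_self (cs : List Char) (lo : Int) : tailRunP cs lo lo = 0 := by
  rw [tailRunP, dif_neg (by omega)]

-- main simulation: from any position i ≥ lo, A's loop with escape = (odd trailing run)
-- equals B's loop over the remaining range.
lemma sim (cs : List Char) (lo : Int) (hlo : -(cs.length : Int) ≤ lo) :
    ∀ i : Int, lo ≤ i →
      expendLoopA cs (cs.length : Int) i (decide (tailRunP cs lo i % 2 = 1)) =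
        expendLoopB cs lo (PySem.List.pyRange i (cs.length : Int) 1) := by
  intro i hi
  by_cases hin : i < (cs.length : Int)
  case neg =>
    rw [expendLoopA, dif_neg hin, PySem.List.pyRange_one_eq_nil (by omega), expendLoopB]
  case pos =>
    have hget : PySem.List.pyGet? cs i ≠ none := by
      intro hnone
      rw [PySem.List.pyGet?_eq_none_iff] at hnone
      simp only [PySem.Raise.InRange] at hnone
      omega
    obtain ⟨c, hc⟩ := Option.ne_none_iff_exists'.mp hget
    have hcd : PySem.List.pyGetD cs i ' ' = c := by
      simp [PySem.List.pyGetD, hc]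
    rw [PySem.List.pyRange_one_cons hin, expendLoopB, expendLoopA, dif_pos hin, hc]
    rw [show runCountB cs lo i 0 = (tailRunP cs lo i : Int) by
      simpa using runCountB_eq_tailRunP cs lo i 0]
    dsimp only
    have hstep := tailRunP_step cs lo i hi
    have ih := sim cs lo hlo (i + 1) (by omega)
    by_cases hodd : tailRunP cs lo i % 2 = 1
    case pos =>
      -- escape = true in A; a quote here (if any) is escaped, so both loops continue
      rw [decide_eq_true hodd, if_neg (show ¬(true = false) by decide)]
      have hnext : ¬(tailRunP cs lo (i + 1) % 2 = 1) := by
        rw [hstep]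
        by_cases hb' : PySem.List.pyGetD cs i ' ' = '\\'
        · rw [if_pos hb']; omega
        · rw [if_neg hb']; omega
      rw [decide_eq_false hnext] at ih
      rw [ih]
      by_cases hq : c = '"'
      · rw [if_neg (by simp [hq]), if_neg (by omega)]
      · rw [if_pos (by simp [hq])]
    case neg =>
      rw [decide_eq_false hodd, if_pos rfl]
      by_cases hq : c = '"'
      · rw [if_pos hq, if_neg (by simp [hq]), if_pos (by omega)]
      · rw [if_neg hq, if_pos (by simp [hq])]
        rw [← ih]
        congr 1
        rw [hstep, hcd]
        by_cases hb : c = '\\'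
        · rw [if_pos hb, decide_eq_true hb, decide_eq_true (show (tailRunP cs lo i + 1) % 2 = 1 by omega)]
        · rw [if_neg hb, decide_eq_false hb, decide_eq_false (by omega)]
termination_by i => ((cs.length : Int) - i).toNat
decreasing_by omega

-- ===== VERDICT (by name: the statement is the Claim_ definition above) =====
theorem expend_str_spec : Claim_equal_expend_str := by
  intro text start _hdom hpre
  unfold Spec_expend_str expend_str expend_str_alt
  have hlo : -(text.toList.length : Int) ≤ start + 1 := by
    unfold Pre_expend_str at hpre
    simp only [Bool.and_eq_true, decide_eq_true_eq] at hpre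
    exact hpre.1
  have := sim text.toList (start + 1) hlo (start + 1) (le_refl _)
  rw [tailRunP_self] at this
  simpa using this
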